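-- pv_equiv track=rewrite | github.com/baibaichen/gluten | dev/analyze-panorama.py | suite_test_map
-- ===== SOURCE A (Python) =====
-- from collections import OrderedDict, defaultdict
--
-- def suite_test_map(test_results, suite_set):
--     """Build {suite: {test_name: result_dict}} for given suites.
--
--     When the same suite+test appears multiple times (e.g., from spark40 + spark41 logs),
--     keep the worst result: FAILED > PASSED > IGNORED.
--     """
--     _result_rank = {'FAILED': 3, 'PASSED': 2, 'IGNORED': 1}
--     m = defaultdict(dict)
--     for t in test_results:
--         if t['suite'] in suite_set:
--             existing = m[t['suite']].get(t['test'])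
--             if existing is None or _result_rank.get(t['result'], 0) > _result_rank.get(existing['result'], 0):
--                 m[t['suite']][t['test']] = t
--     return m
-- ===== SOURCE B (Python) =====
-- from collections import defaultdict
--
-- def suite_test_map(test_results, suite_set):
--     """Group records by (suite, test), then keep the worst result per bucket.
--
--     Two-phase: first bucket every relevant record, then reduce each bucket
--     with max over the result rank (FAILED > PASSED > IGNORED); Python's max
--     keeps the first maximal element, i.e. the earliest worst record.
--     """
--     _result_rank = {'FAILED': 3, 'PASSED': 2, 'IGNORED': 1}
--     groups = defaultdict(list)
--     for t in test_results:
--         if t['suite'] in suite_set: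
--             groups[(t['suite'], t['test'])].append(t)
--     m = defaultdict(dict)
--     for (suite, test), items in groups.items():
--         m[suite][test] = max(items, key=lambda it: _result_rank.get(it.get('result'), 0))
--     return m
-- ===== Notes on version B (the rewrite author's own statement) =====
-- stated objective: alternative
-- what changed: A's single scan that compares each record against the currently stored one is replaced by a two-phase group-then-reduce: first bucket every selected record under its (suite, test) key, then pick each bucket's winner with max over the result rank (Python's max keeps the first maximal element, matching A's strict '>').
import Mathlib
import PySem

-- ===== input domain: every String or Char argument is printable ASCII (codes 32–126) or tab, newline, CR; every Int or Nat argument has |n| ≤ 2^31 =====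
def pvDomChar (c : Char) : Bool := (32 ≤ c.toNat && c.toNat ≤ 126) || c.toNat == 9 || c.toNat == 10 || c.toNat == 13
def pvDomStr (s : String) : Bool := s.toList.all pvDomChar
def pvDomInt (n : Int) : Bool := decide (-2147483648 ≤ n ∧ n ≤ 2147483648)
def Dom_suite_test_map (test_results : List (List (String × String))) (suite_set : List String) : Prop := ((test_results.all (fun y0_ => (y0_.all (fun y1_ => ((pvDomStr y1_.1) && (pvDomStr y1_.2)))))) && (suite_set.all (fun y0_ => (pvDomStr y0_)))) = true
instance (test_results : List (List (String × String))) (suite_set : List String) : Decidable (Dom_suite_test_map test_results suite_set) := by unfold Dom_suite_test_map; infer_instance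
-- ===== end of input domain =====

-- B replaces A's single scan-and-compare with a group-by-(suite,test) pass followed by a
-- per-bucket max-by-rank reduction (same cost class; objective: alternative decomposition).

-- ===== PORT A =====
-- _result_rank = {'FAILED': 3, 'PASSED': 2, 'IGNORED': 1}
def pvRankDict : PySem.Dict String Int :=
  PySem.Dict.ofList [("FAILED", 3), ("PASSED", 2), ("IGNORED", 1)]

-- _result_rank.get(r, 0)
def pvRank (r : String) : Int := pvRankDict.getD r 0

-- one iteration of A's loop body (records are Python dicts: assoc lists, first-match lookup)
def pvStepA (suite_set : List String)
    (m : PySem.Dict String (PySem.Dict String (List (String × String))))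
    (t : List (String × String)) :
    PySem.Dict String (PySem.Dict String (List (String × String))) :=
  match t.lookup "suite" with
  | none => m                                   -- KeyError: excluded by Pre_
  | some s =>
    if s ∈ suite_set then
      -- m[t['suite']]: defaultdict read inserts an empty dict if absent
      let m1 := m.setdefault s PySem.Dict.empty
      let inner := m1.getD s PySem.Dict.empty
      match t.lookup "test" with
      | none => m1                              -- KeyError: excluded by Pre_
      | some te =>
        match inner.get? te with
        | none => m1.insert s (inner.insert te t)          -- existing is None
        | some ex =>
          match t.lookup "result" with
          | none => m1                          -- KeyError: excluded by Pre_
          | some r =>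
            match ex.lookup "result" with
            | none => m1                        -- KeyError: excluded by Pre_
            | some er =>
              if pvRank r > pvRank er then m1.insert s (inner.insert te t) else m1
    else m

def suite_test_map (test_results : List (List (String × String))) (suite_set : List String) : List (String × List (String × List (String × String))) :=
  ((test_results.foldl (pvStepA suite_set) PySem.Dict.empty).items.map
    (fun p => (p.1, p.2.items)))

-- ===== PORT B =====
-- _result_rank.get(it.get('result'), 0)
def pvKey (t : List (String × String)) : Int :=
  match t.lookup "result" with
  | some r => pvRank r
  | none => 0

-- phase 1: groups[(t['suite'], t['test'])].append(t)
def pvStepG (suite_set : List String)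
    (g : PySem.Dict (String × String) (List (List (String × String))))
    (t : List (String × String)) :
    PySem.Dict (String × String) (List (List (String × String))) :=
  match t.lookup "suite" with
  | none => g                                   -- KeyError: excluded by Pre_
  | some s =>
    if s ∈ suite_set then
      match t.lookup "test" with
      | none => g                               -- KeyError: excluded by Pre_
      | some te => g.insert (s, te) (g.getD (s, te) [] ++ [t])
    else g

-- phase 2: m[suite][test] = max(items, key=...)
def pvReduceStep
    (m : PySem.Dict String (PySem.Dict String (List (String × String))))
    (pr : (String × String) × List (List (String × String))) :
    PySem.Dict String (PySem.Dict String (List (String × String))) :=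
  let best := match PySem.List.max? pr.2 pvKey with
              | some w => w
              | none => []                      -- buckets are never empty
  m.insert pr.1.1 ((m.getD pr.1.1 PySem.Dict.empty).insert pr.1.2 best)

def suite_test_map_alt (test_results : List (List (String × String))) (suite_set : List String) : List (String × List (String × List (String × String))) :=
  (((test_results.foldl (pvStepG suite_set) PySem.Dict.empty).items.foldl
      pvReduceStep PySem.Dict.empty).items.map
    (fun p => (p.1, p.2.items)))

-- ===== PRECONDITION & SPEC =====
-- does u fall in the same (suite, test) bucket as t?
def pvSameBucket (t u : List (String × String)) : Bool :=
  (u.lookup "suite" == t.lookup "suite") && (u.lookup "test" == t.lookup "test")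

-- A raises KeyError iff some record lacks 'suite'; or a record whose suite is selected lacks
-- 'test'; or a selected record whose (suite, test) bucket occurs more than once lacks 'result'.
def pvPreRec (test_results : List (List (String × String))) (suite_set : List String)
    (t : List (String × String)) : Bool :=
  match t.lookup "suite" with
  | none => false
  | some s =>
    if s ∈ suite_set then
      match t.lookup "test" with
      | none => false
      | some _ =>
        !(decide (2 ≤ test_results.countP (pvSameBucket t))) || (t.lookup "result").isSome
    else true

-- Pre_ excludes exactly the inputs on which the Python A raises KeyError (see comment above).
def Pre_suite_test_map (test_results : List (List (String × String))) (suite_set : List String) : Prop :=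
  test_results.all (pvPreRec test_results suite_set) = true

instance (test_results : List (List (String × String))) (suite_set : List String) : Decidable (Pre_suite_test_map test_results suite_set) := by unfold Pre_suite_test_map; infer_instance

def pvWitness_suite_test_map : (List (List (String × String))) × List String :=
  ([[("suite", "s1"), ("test", "t1"), ("result", "PASSED")],
    [("suite", "s1"), ("test", "t1"), ("result", "FAILED")],
    [("suite", "s2"), ("test", "t2")]],
   ["s1"])

def Spec_suite_test_map (test_results : List (List (String × String))) (suite_set : List String) (out : List (String × List (String × List (String × String)))) : Prop := out = suite_test_map_alt test_results suite_set
instance (test_results : List (List (String × String))) (suite_set : List String) (out : List (String × List (String × List (String × String)))) : Decidable (Spec_suite_test_map test_results suite_set out) := by unfold Spec_suite_test_map; infer_instance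

-- ===== CLAIM (what is proved, stated in full; the proofs are below) =====
def Claim_equal_suite_test_map : Prop := ∀ (test_results : List (List (String × String))) (suite_set : List String), Dom_suite_test_map test_results suite_set → Pre_suite_test_map test_results suite_set → Spec_suite_test_map test_results suite_set (suite_test_map test_results suite_set)

-- ===== LEMMAS AND PROOFS =====

-- abbreviations used only by the proofs
abbrev PvRec := List (String × String)
abbrev PvInner := PySem.Dict String PvRec
abbrev PvM := PySem.Dict String PvInner
abbrev PvG := PySem.Dict (String × String) (List PvRec)

-- the reduce of phase 2, over an arbitrary items list from an arbitrary start
def pvReduce (l : List ((String × String) × List PvRec)) (m : PvM) : PvM :=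
  l.foldl pvReduceStep m

-- winner of a bucket, as pvReduceStep computes it
def pvBest (v : List PvRec) : PvRec :=
  match PySem.List.max? v pvKey with
  | some w => w
  | none => []

-- in-place overwrite of the (s, te) slot
def pvOv (m : PvM) (s te : String) (w : PvRec) : PvM :=
  m.insert s ((m.getD s PySem.Dict.empty).insert te w)

-- two inserts at different keys commute when the left key is already present
theorem pv_insert_comm_left {κ ν : Type} [BEq κ] [LawfulBEq κ]
    (d : PySem.Dict κ ν) (k k' : κ) (v w : ν)
    (hk : d.contains k = true) (hne : k' ≠ k) :
    (d.insert k v).insert k' w = (d.insert k' w).insert k v := by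
  apply PySem.Dict.ext
  by_cases hk' : d.contains k' = true
  · have h1 : (d.insert k v).contains k' = true := by
      rw [PySem.Dict.contains_insert]; simp [hk']
    have h2 : (d.insert k' w).contains k = true := by
      rw [PySem.Dict.contains_insert]; simp [hk]
    rw [PySem.Dict.items_insert_of_contains _ _ h1, PySem.Dict.items_insert_of_contains _ _ hk,
        PySem.Dict.items_insert_of_contains _ _ h2, PySem.Dict.items_insert_of_contains _ _ hk']
    simp only [List.map_map]
    apply List.map_congr_left
    intro p _
    simp only [Function.comp]
    by_cases hp : p.1 = k
    · have hkk' : (k == k') = false := by simp [Ne.symm hne]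
      simp [hp, hkk']
    · by_cases hp' : p.1 = k'
      · simp [hp', hne]
      · simp [hp, hp']
  · have hk'f : d.contains k' = false := by simpa using hk'
    have h1 : (d.insert k v).contains k' = false := by
      rw [PySem.Dict.contains_insert]; simp [hk'f, hne]
    have h2 : (d.insert k' w).contains k = true := by
      rw [PySem.Dict.contains_insert]; simp [hk]
    rw [PySem.Dict.items_insert_of_not_contains _ _ h1, PySem.Dict.items_insert_of_contains _ _ hk,
        PySem.Dict.items_insert_of_contains _ _ h2, PySem.Dict.items_insert_of_not_contains _ _ hk'f]
    rw [List.map_append]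
    simp [hne]

-- lookup through a reduce: the last write wins; with unique keys, find? describes it
theorem pv_reduce_get (l : List ((String × String) × List PvRec)) (m : PvM)
    (hnd : (l.map (·.1)).Nodup) (s te : String) :
    (((pvReduce l m).getD s PySem.Dict.empty).get? te) =
      (match l.find? (fun pr => pr.1 == (s, te)) with
       | some pr => some (pvBest pr.2)
       | none => ((m.getD s PySem.Dict.empty).get? te)) := by
  induction l generalizing m with
  | nil => simp [pvReduce]
  | cons pr rest ih =>
    rw [List.map_cons, List.nodup_cons] at hnd
    obtain ⟨hnd1, hnd2⟩ := hnd
    by_cases h : pr.1 = (s, te)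
    · have hfind : rest.find? (fun q => q.1 == (s, te)) = none := by
        apply List.find?_eq_none.mpr
        intro q hq
        simp only [beq_iff_eq]
        intro hq1
        exact hnd1 (by rw [← h] at hq1; exact hq1 ▸ List.mem_map_of_mem hq)
      have : pvReduce (pr :: rest) m = pvReduce rest (pvReduceStep m pr) := rfl
      rw [this, ih (pvReduceStep m pr) hnd2, hfind,
          List.find?_cons_of_pos (by simp [h])]
      simp only [pvReduceStep]
      rw [h]
      simp only [PySem.Dict.getD_insert_self, PySem.Dict.get?_insert_self, pvBest]
      rfl
    · have : pvReduce (pr :: rest) m = pvReduce rest (pvReduceStep m pr) := rfl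
      rw [this, ih (pvReduceStep m pr) hnd2,
          List.find?_cons_of_neg (by simp [h])]
      cases hfind : rest.find? (fun q => q.1 == (s, te)) with
      | some q => rfl
      | none =>
        simp only [pvReduceStep]
        by_cases hss : pr.1.1 = s
        · have hte2 : pr.1.2 ≠ te := by
            intro hte2; exact h (Prod.ext hss hte2)
          rw [hss, PySem.Dict.getD_insert_self,
              PySem.Dict.get?_insert_of_ne _ _ (Ne.symm hte2)]
        · rw [PySem.Dict.getD_insert_of_ne _ _ _ (Ne.symm hss)]

-- pvReduceStep preserves presence of an (s, te) slot
theorem pv_step_preserves (m : PvM) (pr : (String × String) × List PvRec) (s te : String)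
    (hs : m.contains s = true) (hte : (m.getD s PySem.Dict.empty).contains te = true) :
    (pvReduceStep m pr).contains s = true ∧
      ((pvReduceStep m pr).getD s PySem.Dict.empty).contains te = true := by
  constructor
  · rw [pvReduceStep, PySem.Dict.contains_insert]; simp [hs]
  · by_cases hss : pr.1.1 = s
    · rw [pvReduceStep, hss, PySem.Dict.getD_insert_self, PySem.Dict.contains_insert]
      simp [hte]
    · rw [pvReduceStep, PySem.Dict.getD_insert_of_ne _ _ _ (Ne.symm hss)]
      exact hte

-- an in-place overwrite of a present slot commutes with one reduce step at another key
theorem pv_step_ov (m : PvM) (pr : (String × String) × List PvRec) (s te : String) (w : PvRec)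
    (hs : m.contains s = true) (hte : (m.getD s PySem.Dict.empty).contains te = true)
    (hne : pr.1 ≠ (s, te)) :
    pvReduceStep (pvOv m s te w) pr = pvOv (pvReduceStep m pr) s te w := by
  by_cases hss : pr.1.1 = s
  · have hte2 : pr.1.2 ≠ te := by
      intro hte2; exact hne (Prod.ext hss hte2)
    simp only [pvReduceStep, pvOv, hss]
    rw [PySem.Dict.getD_insert_self, PySem.Dict.getD_insert_self,
        PySem.Dict.insert_insert_self, PySem.Dict.insert_insert_self,
        pv_insert_comm_left _ te pr.1.2 w _ hte hte2]
  · simp only [pvReduceStep, pvOv]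
    rw [PySem.Dict.getD_insert_of_ne _ _ _ (fun h => hss h.symm),
        PySem.Dict.getD_insert_of_ne _ _ _ hss,
        pv_insert_comm_left m s pr.1.1 _ _ hs hss]

-- ... and hence with a whole reduce that never touches (s, te)
theorem pv_reduce_ov (l : List ((String × String) × List PvRec)) (m : PvM)
    (s te : String) (w : PvRec)
    (hl : (s, te) ∉ l.map (·.1))
    (hs : m.contains s = true) (hte : (m.getD s PySem.Dict.empty).contains te = true) :
    pvReduce l (pvOv m s te w) = pvOv (pvReduce l m) s te w := by
  induction l generalizing m with
  | nil => rfl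
  | cons pr rest ih =>
    have hne : pr.1 ≠ (s, te) := by
      intro h; exact hl (by simp [← h])
    have hrest : (s, te) ∉ rest.map (·.1) := by
      intro h; exact hl (by simp [h])
    have hpres := pv_step_preserves m pr s te hs hte
    have : pvReduce (pr :: rest) (pvOv m s te w)
         = pvReduce rest (pvReduceStep (pvOv m s te w) pr) := rfl
    rw [this, pv_step_ov m pr s te w hs hte hne,
        ih (pvReduceStep m pr) hrest hpres.1 hpres.2]
    rfl

-- the commuting square: one A-step on the reduced dict = reduce of one G-step
theorem pv_commute (ss : List String) (g : PvG) (t : PvRec)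
    (hnd : g.keys.Nodup)
    (hinv : ∀ pr ∈ g.items, pr.2 ≠ [] ∧ ∀ r ∈ pr.2,
      r.lookup "suite" = some pr.1.1 ∧ r.lookup "test" = some pr.1.2)
    (hsu : ∀ s, t.lookup "suite" = some s → s ∈ ss → (t.lookup "test").isSome)
    (hres : ∀ s te, t.lookup "suite" = some s → s ∈ ss → t.lookup "test" = some te →
      g.contains (s, te) = true →
      (t.lookup "result").isSome ∧ ∀ r ∈ g.getD (s, te) [], (r.lookup "result").isSome) :
    pvReduce (pvStepG ss g t).items PySem.Dict.empty =
      pvStepA ss (pvReduce g.items PySem.Dict.empty) t := by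
  cases hsu0 : t.lookup "suite" with
  | none => simp only [pvStepG, pvStepA, hsu0]
  | some s =>
    by_cases hmem : s ∈ ss
    · cases hte0 : t.lookup "test" with
      | none =>
        have := hsu s hsu0 hmem
        rw [hte0] at this
        simp at this
      | some te =>
        have hnd' : (g.items.map (·.1)).Nodup := hnd
        set R := pvReduce g.items PySem.Dict.empty with hR
        have hgetR := pv_reduce_get g.items PySem.Dict.empty hnd' s te
        by_cases hcont : g.contains (s, te) = true
        · -- the bucket already exists
          obtain ⟨v, hv⟩ : ∃ v, g.get? (s, te) = some v := by
            rw [PySem.Dict.contains_eq_isSome_get?] at hcont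
            exact Option.isSome_iff_exists.mp hcont
          have hmemit : ((s, te), v) ∈ g.items := PySem.Dict.mem_items_of_get?_eq_some g hv
          obtain ⟨l1, l2, hsplit⟩ := List.append_of_mem hmemit
          have hndsplit := hnd'
          rw [hsplit, List.map_append, List.map_cons] at hndsplit
          have hk1 : (s, te) ∉ l1.map (·.1) := by
            intro h
            exact (List.disjoint_of_nodup_append hndsplit) h (by simp)
          have hk2 : (s, te) ∉ l2.map (·.1) := by
            have := (List.nodup_append.mp hndsplit).2.1
            rw [List.nodup_cons] at this
            exact this.1
          have hfind : g.items.find? (fun q => q.1 == (s, te)) = some ((s, te), v) := by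
            rw [hsplit, List.find?_append]
            have h1 : l1.find? (fun q => q.1 == (s, te)) = none := by
              apply List.find?_eq_none.mpr
              intro q hq
              simp only [beq_iff_eq]
              exact fun h => hk1 (h ▸ List.mem_map_of_mem hq)
            rw [h1, List.find?_cons_of_pos (by simp)]
            rfl
          have hex : (R.getD s PySem.Dict.empty).get? te = some (pvBest v) := by
            rw [hgetR, hfind]
          -- the bucket is nonempty: max? returns its first maximal element b
          have hvne : v ≠ [] := ((hinv _ hmemit).1)
          obtain ⟨b, hb⟩ : ∃ b, PySem.List.max? v pvKey = some b := by
            cases h : PySem.List.max? v pvKey with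
            | none => exact absurd ((PySem.List.max?_eq_none_iff v pvKey).mp h) hvne
            | some b => exact ⟨b, rfl⟩
          have hbestv : pvBest v = b := by rw [pvBest, hb]
          have hbmem : b ∈ v := PySem.List.max?_mem hb
          have hgd : g.getD (s, te) [] = v := PySem.Dict.getD_of_mem_items _ hmemit hnd _
          obtain ⟨hrt, hrall⟩ := hres s te hsu0 hmem hte0 hcont
          obtain ⟨rt, hrt⟩ := Option.isSome_iff_exists.mp hrt
          obtain ⟨rb, hrb⟩ := Option.isSome_iff_exists.mp (by rw [hgd] at hrall; exact hrall b hbmem)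
          have hkt : pvKey t = pvRank rt := by rw [pvKey, hrt]
          have hkb : pvKey b = pvRank rb := by rw [pvKey, hrb]
          -- R contains s
          have hRs : R.contains s = true := by
            by_contra hf
            have hf' : R.contains s = false := by simpa using hf
            rw [PySem.Dict.getD_of_not_contains _ _ hf', PySem.Dict.get?_empty] at hex
            simp at hex
          -- new items list after the in-place append
          have hitems' : (g.insert (s, te) (g.getD (s, te) [] ++ [t])).items
              = l1 ++ ((s, te), v ++ [t]) :: l2 := by
            rw [PySem.Dict.items_insert_of_contains _ _ hcont, hgd, hsplit,
                List.map_append, List.map_cons]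
            congr 1
            · apply (List.map_congr_left _).trans (List.map_id _)
              intro q hq
              have : q.1 ≠ (s, te) := fun h => hk1 (h ▸ List.mem_map_of_mem hq)
              simp [this]
            · congr 1
              · simp
              · apply (List.map_congr_left _).trans (List.map_id _)
                intro q hq
                have : q.1 ≠ (s, te) := fun h => hk2 (h ▸ List.mem_map_of_mem hq)
                simp [this]
          -- max over the extended bucket
          have hmax' : PySem.List.max? (v ++ [t]) pvKey
              = if pvKey b < pvKey t then some t else some b := by
            unfold PySem.List.max? at hb ⊢
            rw [List.foldl_append, hb]
            simp
          set M1 := pvReduce l1 PySem.Dict.empty with hM1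
          set I1 := M1.getD s PySem.Dict.empty with hI1
          have hRsplit : R = pvReduce l2 (pvReduceStep M1 ((s, te), v)) := by
            rw [hR, hsplit]
            show List.foldl pvReduceStep PySem.Dict.empty (l1 ++ ((s, te), v) :: l2)
              = List.foldl pvReduceStep (pvReduceStep M1 ((s, te), v)) l2
            rw [List.foldl_append]
            rfl
          have hstepmid : pvReduceStep M1 ((s, te), v) = M1.insert s (I1.insert te b) := by
            rw [pvReduceStep, hb]
          -- unfold the A-side step
          rw [pvStepG, pvStepA, hsu0, hte0]
          simp only [if_pos hmem]
          rw [PySem.Dict.setdefault_of_contains _ _ hRs]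
          simp only [hex, hbestv, hrt, hrb]
          by_cases hlt : pvRank rb < pvRank rt
          · -- the new record wins: both sides overwrite the slot with t
            have hgt : pvRank rt > pvRank rb := hlt
            rw [if_pos hgt]
            have hmid' : pvReduceStep M1 ((s, te), v ++ [t])
                = pvOv (pvReduceStep M1 ((s, te), v)) s te t := by
              rw [hstepmid, pvReduceStep, pvOv, PySem.Dict.getD_insert_self,
                  PySem.Dict.insert_insert_self, PySem.Dict.insert_insert_self, hmax',
                  hkb, hkt, if_pos hlt]
            have hcontA : (pvReduceStep M1 ((s, te), v)).contains s = true := by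
              rw [hstepmid]; exact PySem.Dict.contains_insert_self _ _ _
            have hcontI : ((pvReduceStep M1 ((s, te), v)).getD s PySem.Dict.empty).contains te
                = true := by
              rw [hstepmid, PySem.Dict.getD_insert_self]
              exact PySem.Dict.contains_insert_self _ _ _
            calc pvReduce (g.insert (s, te) (g.getD (s, te) [] ++ [t])).items PySem.Dict.empty
                = pvReduce l2 (pvOv (pvReduceStep M1 ((s, te), v)) s te t) := by
                  rw [hitems']
                  show List.foldl pvReduceStep PySem.Dict.empty (l1 ++ ((s, te), v ++ [t]) :: l2) = _
                  rw [List.foldl_append]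
                  show List.foldl pvReduceStep (pvReduceStep M1 ((s, te), v ++ [t])) l2 = _
                  rw [hmid']
                  rfl
              _ = pvOv (pvReduce l2 (pvReduceStep M1 ((s, te), v))) s te t :=
                  pv_reduce_ov l2 _ s te t hk2 hcontA hcontI
              _ = R.insert s ((R.getD s PySem.Dict.empty).insert te t) := by
                  rw [← hRsplit]; rfl
          · -- the stored record stays: both sides are unchanged
            have hngt : ¬ (pvRank rt > pvRank rb) := hlt
            rw [if_neg hngt]
            have hmid' : pvReduceStep M1 ((s, te), v ++ [t])
                = pvReduceStep M1 ((s, te), v) := by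
              rw [pvReduceStep, pvReduceStep, hmax', hkb, hkt, if_neg hlt, hb]
            rw [hitems', hRsplit]
            show List.foldl pvReduceStep PySem.Dict.empty (l1 ++ ((s, te), v ++ [t]) :: l2) = _
            rw [List.foldl_append]
            show List.foldl pvReduceStep (pvReduceStep M1 ((s, te), v ++ [t])) l2 = _
            rw [hmid']
            rfl
        · -- a fresh bucket
          have hcontf : g.contains (s, te) = false := by simpa using hcont
          have hfind : g.items.find? (fun q => q.1 == (s, te)) = none := by
            rw [PySem.Dict.contains] at hcontf
            apply List.find?_eq_none.mpr
            intro q hq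
            exact (List.any_eq_false.mp hcontf) q hq
          have hex : (R.getD s PySem.Dict.empty).get? te = none := by
            rw [hgetR, hfind, PySem.Dict.getD_empty, PySem.Dict.get?_empty]
          have hgd : g.getD (s, te) [] = [] := PySem.Dict.getD_of_not_contains _ _ hcontf
          have hitems' : (g.insert (s, te) (g.getD (s, te) [] ++ [t])).items
              = g.items ++ [((s, te), [t])] := by
            rw [hgd, PySem.Dict.items_insert_of_not_contains _ _ hcontf]
            rfl
          have hred : pvReduce (g.insert (s, te) (g.getD (s, te) [] ++ [t])).items PySem.Dict.empty
              = R.insert s ((R.getD s PySem.Dict.empty).insert te t) := by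
            rw [hitems']
            simp only [pvReduce, List.foldl_append, List.foldl_cons, List.foldl_nil]
            rfl
          rw [pvStepG, pvStepA, hsu0, hte0]
          simp only [if_pos hmem]
          by_cases hRs : R.contains s = true
          · rw [PySem.Dict.setdefault_of_contains _ _ hRs]
            simp only [hex]
            exact hred
          · have hRsf : R.contains s = false := by simpa using hRs
            rw [PySem.Dict.setdefault_of_not_contains _ _ hRsf]
            have hgR : (R.insert s PySem.Dict.empty).getD s PySem.Dict.empty
                = PySem.Dict.empty := PySem.Dict.getD_insert_self _ _ _ _
            simp only [hgR, PySem.Dict.get?_empty]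
            rw [PySem.Dict.insert_insert_self, hred,
                PySem.Dict.getD_of_not_contains _ _ hRsf]
    · simp only [pvStepG, pvStepA, hsu0, if_neg hmem]

-- the main induction along the input list, carrying the grouping invariants
theorem pv_go (ss : List String) (ts : List PvRec)
    (hpre : ∀ t ∈ ts, pvPreRec ts ss t = true) :
    ∀ (rest p : List PvRec), ts = p ++ rest →
      (p.foldl (pvStepA ss) PySem.Dict.empty
        = pvReduce (p.foldl (pvStepG ss) PySem.Dict.empty).items PySem.Dict.empty) →
      ((p.foldl (pvStepG ss) PySem.Dict.empty).keys.Nodup) →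
      (∀ pr ∈ (p.foldl (pvStepG ss) PySem.Dict.empty).items, pr.2 ≠ [] ∧ ∀ r ∈ pr.2,
        r ∈ p ∧ r.lookup "suite" = some pr.1.1 ∧ r.lookup "test" = some pr.1.2) →
      ts.foldl (pvStepA ss) PySem.Dict.empty
        = pvReduce (ts.foldl (pvStepG ss) PySem.Dict.empty).items PySem.Dict.empty := by
  intro rest
  induction rest with
  | nil =>
    intro p hts h1 _ _
    rw [List.append_nil] at hts
    subst hts
    exact h1
  | cons t rest' ih =>
    intro p hts h1 hnd hinv
    have htmem : t ∈ ts := by rw [hts]; simp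
    set g := p.foldl (pvStepG ss) PySem.Dict.empty with hg
    have hinv' : ∀ pr ∈ g.items, pr.2 ≠ [] ∧ ∀ r ∈ pr.2,
        r.lookup "suite" = some pr.1.1 ∧ r.lookup "test" = some pr.1.2 := by
      intro pr hpr
      exact ⟨(hinv pr hpr).1, fun r hr => ((hinv pr hpr).2 r hr).2⟩
    -- facts about t from the precondition
    have hpret := hpre t htmem
    have hsu : ∀ s, t.lookup "suite" = some s → s ∈ ss → (t.lookup "test").isSome := by
      intro s h hs
      cases hte : t.lookup "test" with
      | none =>
        simp only [pvPreRec, h, if_pos hs, hte] at hpret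
        exact absurd hpret (by simp)
      | some te => simp
    have hres : ∀ s te, t.lookup "suite" = some s → s ∈ ss → t.lookup "test" = some te →
        g.contains (s, te) = true →
        (t.lookup "result").isSome ∧ ∀ r ∈ g.getD (s, te) [], (r.lookup "result").isSome := by
      intro s te hsu0 hmem hte0 hcont
      -- the bucket is inhabited by some earlier record r0 ∈ p
      obtain ⟨v, hv⟩ : ∃ v, g.get? (s, te) = some v := by
        rw [PySem.Dict.contains_eq_isSome_get?] at hcont
        exact Option.isSome_iff_exists.mp hcont
      have hmemit : ((s, te), v) ∈ g.items := PySem.Dict.mem_items_of_get?_eq_some g hv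
      have hgd : g.getD (s, te) [] = v := PySem.Dict.getD_of_mem_items _ hmemit hnd _
      obtain ⟨hvne, hmembers⟩ := hinv _ hmemit
      obtain ⟨r0, hr0⟩ := List.exists_mem_of_ne_nil v hvne
      obtain ⟨hr0p, hr0su, hr0te⟩ := hmembers r0 hr0
      -- hence the (suite, test) bucket of t occurs at least twice in ts
      have hbt : pvSameBucket t t = true := by simp [pvSameBucket]
      have hbr0 : pvSameBucket t r0 = true := by
        simp [pvSameBucket, hr0su, hr0te, hsu0, hte0]
      have hcount : 2 ≤ ts.countP (pvSameBucket t) := by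
        rw [hts, List.countP_append, List.countP_cons_of_pos hbt]
        have h1' : 1 ≤ p.countP (pvSameBucket t) := by
          have := List.countP_pos_iff.mpr ⟨r0, hr0p, hbr0⟩
          omega
        omega
      have hcountSame : ∀ r ∈ p, r.lookup "suite" = some s → r.lookup "test" = some te →
          2 ≤ ts.countP (pvSameBucket r) := by
        intro r _ hrs hrt
        have : pvSameBucket r = pvSameBucket t := by
          funext u
          rw [pvSameBucket, pvSameBucket, hrs, hrt, hsu0, hte0]
        rw [this]
        exact hcount
      constructor
      · simp only [pvPreRec, hsu0, if_pos hmem, hte0] at hpret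
        rcases Bool.or_eq_true_iff.mp hpret with h | h
        · rw [decide_eq_true hcount] at h
          exact absurd h (by simp)
        · exact h
      · intro r hr
        rw [hgd] at hr
        obtain ⟨hrp, hrs, hrt⟩ := hmembers r hr
        have hprer := hpre r (by rw [hts]; exact List.mem_append_left _ hrp)
        simp only [pvPreRec, hrs, if_pos hmem, hrt] at hprer
        rcases Bool.or_eq_true_iff.mp hprer with h | h
        · rw [decide_eq_true (hcountSame r hrp hrs hrt)] at h
          exact absurd h (by simp)
        · exact h
    -- one step of both folds
    have hfoldG : (p ++ [t]).foldl (pvStepG ss) PySem.Dict.empty = pvStepG ss g t := by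
      rw [List.foldl_append]; rfl
    have hfoldA : (p ++ [t]).foldl (pvStepA ss) PySem.Dict.empty
        = pvStepA ss (p.foldl (pvStepA ss) PySem.Dict.empty) t := by
      rw [List.foldl_append]; rfl
    have h1' : (p ++ [t]).foldl (pvStepA ss) PySem.Dict.empty
        = pvReduce ((p ++ [t]).foldl (pvStepG ss) PySem.Dict.empty).items PySem.Dict.empty := by
      rw [hfoldA, hfoldG, h1, pv_commute ss g t hnd hinv' hsu hres]
    -- the invariants survive the step
    have hnd' : ((p ++ [t]).foldl (pvStepG ss) PySem.Dict.empty).keys.Nodup := by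
      rw [hfoldG]
      cases hsu0 : t.lookup "suite" with
      | none => simp only [pvStepG, hsu0]; exact hnd
      | some s =>
        cases hte0 : t.lookup "test" with
        | none =>
          simp only [pvStepG, hsu0, hte0]
          split <;> exact hnd
        | some te =>
          simp only [pvStepG, hsu0, hte0]
          by_cases hs : s ∈ ss
          · rw [if_pos hs]; exact PySem.Dict.nodup_keys_insert _ _ _ hnd
          · rw [if_neg hs]; exact hnd
    have hinvnew : ∀ pr ∈ ((p ++ [t]).foldl (pvStepG ss) PySem.Dict.empty).items,
        pr.2 ≠ [] ∧ ∀ r ∈ pr.2,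
        r ∈ p ++ [t] ∧ r.lookup "suite" = some pr.1.1 ∧ r.lookup "test" = some pr.1.2 := by
      have hold : ∀ pr ∈ g.items, pr.2 ≠ [] ∧ ∀ r ∈ pr.2,
          r ∈ p ++ [t] ∧ r.lookup "suite" = some pr.1.1 ∧ r.lookup "test" = some pr.1.2 := by
        intro pr hpr
        refine ⟨(hinv pr hpr).1, fun r hr => ?_⟩
        obtain ⟨h1'', h2'', h3''⟩ := (hinv pr hpr).2 r hr
        exact ⟨List.mem_append_left _ h1'', h2'', h3''⟩
      rw [hfoldG]
      cases hsu0 : t.lookup "suite" with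
      | none => simp only [pvStepG, hsu0]; exact hold
      | some s =>
        cases hte0 : t.lookup "test" with
        | none =>
          simp only [pvStepG, hsu0, hte0]
          split <;> exact hold
        | some te =>
          simp only [pvStepG, hsu0, hte0]
          by_cases hs : s ∈ ss
          · rw [if_pos hs]
            intro pr hpr
            rcases (PySem.Dict.mem_items_insert _ _ _ _).mp hpr with heq | ⟨hpr', _⟩
            · subst heq
              refine ⟨by simp, fun r hr => ?_⟩
              rcases List.mem_append.mp hr with hrold | hrnew
              · by_cases hcont : g.contains (s, te) = true
                · obtain ⟨v, hv⟩ : ∃ v, g.get? (s, te) = some v := by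
                    rw [PySem.Dict.contains_eq_isSome_get?] at hcont
                    exact Option.isSome_iff_exists.mp hcont
                  have hmemit : ((s, te), v) ∈ g.items :=
                    PySem.Dict.mem_items_of_get?_eq_some g hv
                  have hgd : g.getD (s, te) [] = v :=
                    PySem.Dict.getD_of_mem_items _ hmemit hnd _
                  rw [hgd] at hrold
                  exact hold _ hmemit |>.2 r hrold
                · rw [PySem.Dict.getD_of_not_contains _ _ (by simpa using hcont)] at hrold
                  exact absurd hrold (by simp)
              · have : r = t := by simpa using hrnew
                subst this
                exact ⟨by simp, hsu0, hte0⟩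
            · exact hold pr hpr'
          · rw [if_neg hs]; exact hold
    exact ih (p ++ [t]) (by rw [hts]; simp) h1' hnd' hinvnew

-- the main induction along the input list
theorem pv_main (ss : List String) (ts : List PvRec)
    (hpre : ∀ t ∈ ts, pvPreRec ts ss t = true) :
    ts.foldl (pvStepA ss) PySem.Dict.empty =
      pvReduce (ts.foldl (pvStepG ss) PySem.Dict.empty).items PySem.Dict.empty := by
  refine pv_go ss ts hpre ts [] rfl rfl ?_ ?_
  · show (PySem.Dict.keys (PySem.Dict.empty : PvG)).Nodup
    rw [PySem.Dict.keys_empty]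
    exact List.nodup_nil
  · intro pr hpr
    exact absurd hpr (by simp [PySem.Dict.empty])

-- ===== VERDICT (by name: the statement is the Claim_ definition above) =====
theorem suite_test_map_spec : Claim_equal_suite_test_map := by
  intro ts ss _hdom hpre
  unfold Spec_suite_test_map suite_test_map suite_test_map_alt
  have h := pv_main ss ts (by
    intro t ht
    have := hpre
    unfold Pre_suite_test_map at this
    simpa using (List.all_eq_true.mp this t ht))
  rw [h]
  rfl
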